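-- pv_equiv track=rewrite | github.com/festoni/SokobanSolvers | rank_unrank.py | to_matrix
-- ===== SOURCE A (Python) =====
-- def to_matrix(multiset, walls):
--     #initialize matrix to all 0s
--     matrix = [[0 for i in range(len(walls[0]))] for u in range(len(walls))]
--
--     #run through walls matrix, and for all True entries, set matrix entries to 3
--     for j in range(len(walls)):
--         for k in range(len(walls[0])):
--             if walls[j][k] == True:             #if you run into wall, set to 3
--                 matrix[j][k] = 3
--
--     #run through entries of matrix, for every non 3 val, pop the first value in
--     #the multiset and set it to current matrix entry. Note: this is mutable to
--     #multiset list, so we initially make a deepcopy of it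
--     temp_set = multiset[:]                      #deepcopy the multiset
--     for j in range(len(matrix)):
--         for k in range(len(matrix[0])):
--             if matrix[j][k] == 3:
--                 continue
--             matrix[j][k] = temp_set.pop(0)      #equal to first value of set,pop
--
--     return matrix
-- ===== SOURCE B (Python) =====
-- def to_matrix(multiset, walls):
--     width = len(walls[0]) if walls else 0
--     matrix = []
--     idx = 0
--     for row in walls:
--         out_row = []
--         for k in range(width):
--             if row[k]:
--                 out_row.append(3)
--             else:
--                 out_row.append(multiset[idx])
--                 idx += 1
--         matrix.append(out_row)
--     return matrix
-- ===== Notes on version B (the rewrite author's own statement) =====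
-- stated objective: faster
-- what changed: B builds the matrix in one interleaved row-major pass with an integer cursor into multiset, instead of A's three traversals (allocate a zero matrix, mark walls, then refill non-wall cells by popping the front of a copied multiset); replacing pop(0) by an index removes the O(n) front-shift per filled cell.
import Mathlib
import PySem

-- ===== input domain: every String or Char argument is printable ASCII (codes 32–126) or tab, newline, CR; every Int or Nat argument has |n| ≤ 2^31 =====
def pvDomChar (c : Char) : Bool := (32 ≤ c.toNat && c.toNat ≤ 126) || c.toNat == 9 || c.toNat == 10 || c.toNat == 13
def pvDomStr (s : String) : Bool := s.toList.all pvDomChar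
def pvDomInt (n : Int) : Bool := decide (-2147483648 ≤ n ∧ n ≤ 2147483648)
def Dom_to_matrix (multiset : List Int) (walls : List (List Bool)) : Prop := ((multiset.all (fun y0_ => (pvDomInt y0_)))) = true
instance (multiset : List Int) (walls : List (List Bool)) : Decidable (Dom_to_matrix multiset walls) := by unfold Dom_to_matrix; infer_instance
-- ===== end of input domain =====

-- B replaces A's three grid traversals (zero matrix, wall-marking pass, refill-by-pop pass)
-- by a single interleaved row-major pass indexing multiset with a cursor, avoiding pop(0)'s
-- per-cell front shift (objective: faster; measured).
-- A copies `multiset` before popping, so neither program observably mutates its arguments.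

-- ===== PORT A =====
-- loop body of A's first pass: `if walls[j][k] == True: matrix[j][k] = 3`
def pvBody1 (walls : List (List Bool)) (j : Nat) (m : List (List Int)) (k : Nat) : List (List Int) :=
  if PySem.List.pyGetD (PySem.List.pyGetD walls (j : Int) []) (k : Int) false == true then
    PySem.List.pySetD m (j : Int) (PySem.List.pySetD (PySem.List.pyGetD m (j : Int) []) (k : Int) 3)
  else m

-- loop body of A's second pass: `if matrix[j][k] == 3: continue; matrix[j][k] = temp_set.pop(0)`
-- (`pop(0)` on an empty list raises IndexError in Python; ported totally as headD/tail — those inputs are outside Pre_)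
def pvBody2 (st : List (List Int) × List Int) (j : Nat) (k : Nat) : List (List Int) × List Int :=
  if PySem.List.pyGetD (PySem.List.pyGetD st.1 (j : Int) []) (k : Int) 0 == 3 then st
  else (PySem.List.pySetD st.1 (j : Int)
          (PySem.List.pySetD (PySem.List.pyGetD st.1 (j : Int) []) (k : Int) (st.2.headD 0)),
        st.2.tail)

def to_matrix (multiset : List Int) (walls : List (List Bool)) : List (List Int) :=
  -- len(walls[0]); Python evaluates it only when the comprehension iterates (walls ≠ []) — the [] default is a totality guard
  let cols := (PySem.List.pyGetD walls (0 : Int) ([] : List Bool)).length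
  -- matrix = [[0 for i in range(len(walls[0]))] for u in range(len(walls))]   (range(n) with n = len(...) ≥ 0 ported as List.range)
  let matrix : List (List Int) := (List.range walls.length).map (fun _ => (List.range cols).map (fun _ => (0 : Int)))
  -- first pass: mark walls with 3
  let matrix := (List.range walls.length).foldl
    (fun m j => (List.range cols).foldl (fun m k => pvBody1 walls j m k) m) matrix
  -- temp_set = multiset[:]
  let temp_set := multiset
  -- second pass: fill non-3 entries by popping temp_set
  ((List.range matrix.length).foldl
    (fun st j => (List.range (PySem.List.pyGetD matrix (0 : Int) ([] : List Int)).length).foldl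
      (fun st k => pvBody2 st j k) st) (matrix, temp_set)).1

-- ===== PORT B =====
-- loop body of B's inner loop: append 3 for a wall, else append multiset[idx] and advance idx
-- (`multiset[idx]` raises IndexError when the multiset is exhausted; ported totally with default 0 — outside Pre_)
def pvBodyB (multiset : List Int) (row : List Bool) (st : List Int × Nat) (k : Nat) : List Int × Nat :=
  if PySem.List.pyGetD row (k : Int) false then (st.1 ++ [(3 : Int)], st.2)
  else (st.1 ++ [PySem.List.pyGetD multiset (st.2 : Int) 0], st.2 + 1)

def to_matrix_alt (multiset : List Int) (walls : List (List Bool)) : List (List Int) :=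
  -- width = len(walls[0]) if walls else 0
  let width := if walls = [] then 0 else (PySem.List.pyGetD walls (0 : Int) ([] : List Bool)).length
  (walls.foldl
    (fun (st : List (List Int) × Nat) row =>
      let inner := (List.range width).foldl (fun st2 k => pvBodyB multiset row st2 k) ([], st.2)
      (st.1 ++ [inner.1], inner.2))
    ([], 0)).1

-- ===== PRECONDITION & SPEC =====
-- number of non-wall cells A visits (within the first c columns of each row)
def pvFreeCount (walls : List (List Bool)) (c : Nat) : Nat :=
  (walls.map (fun r => (r.take c).count false)).sum
-- Pre_ excludes exactly the inputs where Python A raises IndexError: a row shorter than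
-- len(walls[0]) (walls[j][k] out of range), or fewer multiset values than non-wall cells (pop from empty list).
def Pre_to_matrix (multiset : List Int) (walls : List (List Bool)) : Prop :=
  (∀ r ∈ walls, (walls.headD []).length ≤ r.length) ∧
  pvFreeCount walls (walls.headD []).length ≤ multiset.length
instance (multiset : List Int) (walls : List (List Bool)) : Decidable (Pre_to_matrix multiset walls) := by
  unfold Pre_to_matrix; infer_instance
def pvWitness_to_matrix : List Int × List (List Bool) :=
  ([1, 2], [[true, false], [false, true]])
def Spec_to_matrix (multiset : List Int) (walls : List (List Bool)) (out : List (List Int)) : Prop := out = to_matrix_alt multiset walls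
instance (multiset : List Int) (walls : List (List Bool)) (out : List (List Int)) : Decidable (Spec_to_matrix multiset walls out) := by unfold Spec_to_matrix; infer_instance

-- ===== CLAIM (what is proved, stated in full; the proofs are below) =====
def Claim_equal_to_matrix : Prop := ∀ (multiset : List Int) (walls : List (List Bool)), Dom_to_matrix multiset walls → Pre_to_matrix multiset walls → Spec_to_matrix multiset walls (to_matrix multiset walls)

-- ===== LEMMAS AND PROOFS =====

-- the common reference function both ports are reduced to:
-- fill one row (b ↦ 3 on walls, else consume the next multiset value), then recurse with the consumed-off multiset
def pvRowFill : List Bool → List Int → List Int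
  | [], _ => []
  | b :: bs, ms => if b then 3 :: pvRowFill bs ms else ms.headD 0 :: pvRowFill bs ms.tail

def pvFill : List (List Bool) → Nat → List Int → List (List Int)
  | [], _, _ => []
  | r :: rs, c, ms => pvRowFill (r.take c) ms :: pvFill rs c (ms.drop ((r.take c).count false))

-- A's pass-1 row content: walls ↦ 3 over an existing row
def pvMark : List Bool → List Int → List Int
  | [], _ => []
  | b :: bs, o => (if b then 3 else o.headD 0) :: pvMark bs o.tail

-- A's pass-2 row content: 3 stays, anything else consumes the multiset
def pvFill2 : List Int → List Int → List Int
  | [], _ => []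
  | v :: vs, ts => if v == 3 then 3 :: pvFill2 vs ts else ts.headD 0 :: pvFill2 vs ts.tail

def pvUsed (vs : List Int) : Nat := vs.countP (fun v => !(v == 3))

def pvFB (b : Bool) : Int := if b then 3 else 0

theorem pvMark_length (bs : List Bool) (o : List Int) : (pvMark bs o).length = bs.length := by
  induction bs generalizing o with
  | nil => simp [pvMark]
  | cons b bs ih => simp [pvMark, ih]
theorem pvFill2_length (vs ts : List Int) : (pvFill2 vs ts).length = vs.length := by
  induction vs generalizing ts with
  | nil => simp [pvFill2]
  | cons v vs ih => by_cases h : v == 3 <;> simp [pvFill2, h, ih]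
theorem pvFill_length (ws : List (List Bool)) (c : Nat) (ms : List Int) : (pvFill ws c ms).length = ws.length := by
  induction ws generalizing ms with
  | nil => simp [pvFill]
  | cons r rs ih => simp [pvFill, ih]

theorem pvGetD_tail {α : Type} (o : List α) (n : Nat) (d : α) : o.tail.getD n d = o.getD (n + 1) d := by
  cases o <;> simp [List.getD]
theorem pvDrop_headD (ms : List Int) (n : Nat) : (ms.drop n).headD 0 = ms.getD n 0 := by
  induction ms generalizing n with
  | nil => simp
  | cons x xs ih =>
    cases n with
    | zero => simp
    | succ n => simpa using ih n

theorem pvMark_append (l : List Bool) (b : Bool) (o : List Int) :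
    pvMark (l ++ [b]) o = pvMark l o ++ [if b then 3 else o.getD l.length 0] := by
  induction l generalizing o with
  | nil => cases o <;> simp [pvMark, List.getD]
  | cons x l ih => simp [pvMark, ih, pvGetD_tail]
theorem pvFill2_append (l : List Int) (v : Int) (ts : List Int) :
    pvFill2 (l ++ [v]) ts = pvFill2 l ts ++ [if v == 3 then 3 else ts.getD (pvUsed l) 0] := by
  induction l generalizing ts with
  | nil => cases ts <;> simp [pvFill2, pvUsed, List.getD] <;> split <;> rfl
  | cons x l ih =>
    by_cases h : x == 3 <;> simp [pvFill2, pvUsed, h, ih]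
theorem pvRowFill_append (l : List Bool) (b : Bool) (ts : List Int) :
    pvRowFill (l ++ [b]) ts = pvRowFill l ts ++ [if b then 3 else ts.getD (l.count false) 0] := by
  induction l generalizing ts with
  | nil => cases ts <;> simp [pvRowFill, List.getD] <;> split <;> rfl
  | cons x l ih => cases x <;> simp [pvRowFill, ih, List.count_cons]

theorem pvMark_replicate (bs : List Bool) (n : Nat) (h : bs.length ≤ n) :
    pvMark bs (List.replicate n (0 : Int)) = bs.map pvFB := by
  induction bs generalizing n with
  | nil => simp [pvMark]
  | cons b bs ih =>
    cases n with
    | zero => simp at h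
    | succ n => simp [pvMark, pvFB, List.replicate_succ, ih n (by simpa using h)]
theorem pvFill2_map_fb (bs : List Bool) (ts : List Int) :
    pvFill2 (bs.map pvFB) ts = pvRowFill bs ts := by
  induction bs generalizing ts with
  | nil => simp [pvFill2, pvRowFill]
  | cons b bs ih => cases b <;> simp [pvFill2, pvRowFill, pvFB, ih]
theorem pvUsed_map_fb (bs : List Bool) : pvUsed (bs.map pvFB) = bs.count false := by
  induction bs with
  | nil => simp [pvUsed]
  | cons b bs ih => cases b <;> simp [pvUsed, pvFB, List.count_cons] at * <;> omega

theorem pvFill_append (ws : List (List Bool)) (r : List Bool) (c : Nat) (ms : List Int) :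
    pvFill (ws ++ [r]) c ms = pvFill ws c ms ++ [pvRowFill (r.take c) (ms.drop (pvFreeCount ws c))] := by
  induction ws generalizing ms with
  | nil => simp [pvFill, pvFreeCount]
  | cons w ws ih => simp [pvFill, pvFreeCount, ih, List.drop_drop, Nat.add_comm]

-- set/getD at the boundary of an append
theorem pvSet_append_len {α : Type} (l1 : List α) (a : α) (l2 : List α) (v : α) :
    (l1 ++ a :: l2).set l1.length v = l1 ++ v :: l2 := by
  induction l1 with
  | nil => simp
  | cons x l1 ih => simp [ih]
theorem pvGetD_append_len {α : Type} (l1 : List α) (a : α) (l2 : List α) (d : α) :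
    (l1 ++ a :: l2).getD l1.length d = a := by
  induction l1 with
  | nil => simp
  | cons x l1 ih => simpa using ih

-- A, first pass, inner loop over k
theorem pvInner1 (walls : List (List Bool)) (j : Nat) (r : List Bool) (cc : Nat) (o : List Int)
    (m : List (List Int)) (hj : j < m.length) (hr : walls.getD j [] = r) (ho : m.getD j [] = o)
    (hcr : cc ≤ r.length) (hco : cc ≤ o.length) :
    (List.range cc).foldl (fun m k => pvBody1 walls j m k) m
      = m.set j (pvMark (r.take cc) o ++ o.drop cc) := by
  induction cc with
  | zero =>
    simp only [List.range_zero, List.foldl_nil, List.take_zero, pvMark, List.nil_append,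
      List.drop_zero]
    rw [← ho, List.getD_eq_getElem m [] hj, List.set_getElem_self]
  | succ cc ih =>
    have hcc_r : cc < r.length := by omega
    have hcc_o : cc < o.length := by omega
    rw [List.range_succ, List.foldl_append, ih (by omega) (by omega)]
    have hmark : (pvMark (r.take cc) o).length = cc := by
      rw [pvMark_length]; simp [hcc_r.le]
    have hgetX : (m.set j (pvMark (r.take cc) o ++ o.drop cc)).getD j [] =
        pvMark (r.take cc) o ++ o.drop cc := by
      rw [List.getD_eq_getElem _ _ (by simpa using hj)]; simp
    have hr' : r.getD cc false = r[cc] := List.getD_eq_getElem r false hcc_r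
    have hdrop : o.drop cc = o[cc] :: o.drop (cc + 1) := List.drop_eq_getElem_cons hcc_o
    have htake : r.take (cc + 1) = r.take cc ++ [r[cc]] := List.take_succ_eq_append_getElem hcc_r
    simp only [List.foldl_cons, List.foldl_nil, pvBody1, PySem.List.pyGetD_natCast,
      PySem.List.pySetD_natCast, hr, hgetX, hr']
    by_cases hb : r[cc] = true
    · simp only [hb, beq_self_eq_true, if_pos, List.set_set]
      have hset := pvSet_append_len (pvMark (r.take cc) o) (o[cc]) (o.drop (cc + 1)) (3 : Int)
      rw [hmark] at hset
      rw [hdrop, hset, htake, pvMark_append]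
      simp [hb, hmark]
    · simp only [Bool.not_eq_true] at hb
      rw [hb, if_neg (by decide)]
      rw [htake, pvMark_append, hdrop]
      have hgo : o.getD cc 0 = o[cc] := List.getD_eq_getElem o 0 hcc_o
      simp [hb, hgo, hcc_r.le, List.getElem?_eq_getElem hcc_o]

-- A, first pass, outer loop over j
theorem pvPass1 (walls : List (List Bool)) (c : Nat) (h : ∀ r ∈ walls, c ≤ r.length) :
    (List.range walls.length).foldl
        (fun m j => (List.range c).foldl (fun m k => pvBody1 walls j m k) m)
        (List.replicate walls.length (List.replicate c (0 : Int)))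
      = walls.map (fun r => (r.take c).map pvFB) := by
  have aux : ∀ n, n ≤ walls.length →
      (List.range n).foldl
          (fun m j => (List.range c).foldl (fun m k => pvBody1 walls j m k) m)
          (List.replicate walls.length (List.replicate c (0 : Int)))
        = (walls.take n).map (fun r => (r.take c).map pvFB)
          ++ List.replicate (walls.length - n) (List.replicate c 0) := by
    intro n hn
    induction n with
    | zero => simp
    | succ n ih =>
      have hnl : n < walls.length := by omega
      rw [List.range_succ, List.foldl_append, ih (by omega)]
      set part := (walls.take n).map (fun r => (r.take c).map pvFB) with hpart
      have hplen : part.length = n := by simp [hpart, hnl.le]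
      have hrep : List.replicate (walls.length - n) (List.replicate c (0 : Int))
          = List.replicate c 0 :: List.replicate (walls.length - (n + 1)) (List.replicate c 0) := by
        have : walls.length - n = (walls.length - (n + 1)) + 1 := by omega
        rw [this, List.replicate_succ]
      simp only [List.foldl_cons, List.foldl_nil]
      rw [hrep]
      rw [pvInner1 walls n walls[n] c (List.replicate c 0)
            (part ++ List.replicate c 0 :: List.replicate (walls.length - (n + 1)) (List.replicate c 0))
            (by simp; omega)
            (List.getD_eq_getElem walls [] hnl)
            (by rw [← hplen]; exact pvGetD_append_len _ _ _ _)
            (h walls[n] (walls.getElem_mem hnl))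
            (by simp)]
      have hset := pvSet_append_len part (List.replicate c (0 : Int))
        (List.replicate (walls.length - (n + 1)) (List.replicate c 0))
        (pvMark (walls[n].take c) (List.replicate c 0) ++ (List.replicate c (0 : Int)).drop c)
      rw [hplen] at hset
      rw [hset, pvMark_replicate _ _ (by simp),
        List.take_succ_eq_append_getElem hnl, List.map_append]
      simp [hpart, List.map_take]
  have := aux walls.length le_rfl
  simpa using this

theorem pvUsed_append (l : List Int) (v : Int) :
    pvUsed (l ++ [v]) = pvUsed l + (if v == 3 then 0 else 1) := by
  by_cases h : v == 3 <;> simp [pvUsed, List.countP_append, h]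

-- A, second pass, inner loop over k
theorem pvInner2 (j cc : Nat) (o : List Int) (m : List (List Int)) (ts : List Int)
    (hj : j < m.length) (ho : m.getD j [] = o) (hco : cc ≤ o.length) :
    (List.range cc).foldl (fun st k => pvBody2 st j k) (m, ts)
      = (m.set j (pvFill2 (o.take cc) ts ++ o.drop cc), ts.drop (pvUsed (o.take cc))) := by
  induction cc with
  | zero =>
    simp only [List.range_zero, List.foldl_nil, List.take_zero, pvFill2, pvUsed,
      List.countP_nil, List.nil_append, List.drop_zero]
    rw [← ho, List.getD_eq_getElem m [] hj, List.set_getElem_self]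
  | succ cc ih =>
    have hcc_o : cc < o.length := by omega
    rw [List.range_succ, List.foldl_append, ih (by omega)]
    have hfl : (pvFill2 (o.take cc) ts).length = cc := by
      rw [pvFill2_length]; simp [hcc_o.le]
    have hdrop : o.drop cc = o[cc] :: o.drop (cc + 1) := List.drop_eq_getElem_cons hcc_o
    have htake : o.take (cc + 1) = o.take cc ++ [o[cc]] := List.take_succ_eq_append_getElem hcc_o
    have hgetX : (m.set j (pvFill2 (o.take cc) ts ++ o.drop cc)).getD j [] =
        pvFill2 (o.take cc) ts ++ o.drop cc := by
      rw [List.getD_eq_getElem _ _ (by simpa using hj)]; simp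
    have hgetc : (pvFill2 (o.take cc) ts ++ o.drop cc).getD cc 0 = o[cc] := by
      have := pvGetD_append_len (pvFill2 (o.take cc) ts) (o[cc]) (o.drop (cc + 1)) (0 : Int)
      rw [hfl] at this
      rw [hdrop, this]
    simp only [List.foldl_cons, List.foldl_nil, pvBody2, PySem.List.pyGetD_natCast,
      PySem.List.pySetD_natCast, hgetX, hgetc]
    by_cases hb : o[cc] = 3
    · rw [if_pos (by simp [hb])]
      rw [htake, pvFill2_append, pvUsed_append]
      simp [hb, hdrop, hfl]
    · rw [if_neg (by simp [hb])]
      have hset := pvSet_append_len (pvFill2 (o.take cc) ts) (o[cc]) (o.drop (cc + 1))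
        (((ts.drop (pvUsed (o.take cc))).headD 0))
      rw [hfl] at hset
      rw [List.set_set, hdrop, hset, htake, pvFill2_append, pvUsed_append]
      simp [hb, pvDrop_headD, List.tail_drop]

-- A, second pass, outer loop over j
theorem pvPass2 (walls : List (List Bool)) (c : Nat) (ms : List Int) (h : ∀ r ∈ walls, c ≤ r.length) :
    (List.range walls.length).foldl
        (fun st j => (List.range c).foldl (fun st k => pvBody2 st j k) st)
        (walls.map (fun r => (r.take c).map pvFB), ms)
      = (pvFill walls c ms, ms.drop (pvFreeCount walls c)) := by
  set M1 := walls.map (fun r => (r.take c).map pvFB) with hM1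
  have aux : ∀ n, n ≤ walls.length →
      (List.range n).foldl (fun st j => (List.range c).foldl (fun st k => pvBody2 st j k) st) (M1, ms)
        = (pvFill (walls.take n) c ms ++ M1.drop n,
           ms.drop (pvFreeCount (walls.take n) c)) := by
    intro n hn
    induction n with
    | zero => simp [pvFill, pvFreeCount]
    | succ n ih =>
      have hnl : n < walls.length := by omega
      have hnM : n < M1.length := by simpa [hM1] using hnl
      rw [List.range_succ, List.foldl_append, ih (by omega)]
      set fillpart := pvFill (walls.take n) c ms with hfp
      have hflen : fillpart.length = n := by simp [hfp, pvFill_length, hnl.le]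
      have hdropM : M1.drop n = ((walls[n].take c).map pvFB) :: M1.drop (n + 1) := by
        rw [List.drop_eq_getElem_cons hnM]; simp [hM1]
      have holen : ((walls[n].take c).map pvFB).length = c := by
        simp [h walls[n] (walls.getElem_mem hnl)]
      simp only [List.foldl_cons, List.foldl_nil]
      rw [hdropM]
      rw [pvInner2 n c ((walls[n].take c).map pvFB)
            (fillpart ++ ((walls[n].take c).map pvFB) :: M1.drop (n + 1))
            (ms.drop (pvFreeCount (walls.take n) c))
            (by simp [hflen] <;> omega)
            (by
              have hg := pvGetD_append_len fillpart ((walls[n].take c).map pvFB)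
                (M1.drop (n + 1)) ([] : List Int)
              rwa [hflen] at hg)
            (by rw [holen])]
      have htakeo : ((walls[n].take c).map pvFB).take c = (walls[n].take c).map pvFB := by
        rw [List.take_of_length_le (by rw [holen])]
      have hdropo : ((walls[n].take c).map pvFB).drop c = [] := by
        rw [List.drop_of_length_le (by rw [holen])]
      have hset := pvSet_append_len fillpart ((walls[n].take c).map pvFB) (M1.drop (n + 1))
        (pvFill2 ((walls[n].take c).map pvFB) (ms.drop (pvFreeCount (walls.take n) c)))
      rw [hflen] at hset
      rw [htakeo, hdropo, List.append_nil, hset, pvFill2_map_fb, pvUsed_map_fb]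
      rw [Prod.mk.injEq]
      refine ⟨?_, ?_⟩
      · rw [List.take_succ_eq_append_getElem hnl, pvFill_append, hfp]
        simp
      · have hsum : (List.take (n + 1) (walls.map (fun r => (r.take c).count false))).sum
            = (List.take n (walls.map (fun r => (r.take c).count false))).sum
              + (walls[n].take c).count false := by
          rw [List.take_succ_eq_append_getElem (by simpa using hnl)]
          simp
        simp [pvFreeCount, List.drop_drop, hsum, Nat.add_comm]
  have hx := aux walls.length le_rfl
  have hd : M1.drop walls.length = [] := List.drop_of_length_le (by simp [hM1])
  rw [hd, List.append_nil, List.take_length] at hx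
  exact hx

-- A equals the reference function
theorem pvA_eq (ms : List Int) (walls : List (List Bool))
    (h : ∀ r ∈ walls, (walls.headD []).length ≤ r.length) :
    to_matrix ms walls = pvFill walls (walls.headD []).length ms := by
  cases walls with
  | nil => simp [to_matrix, pvFill]
  | cons w ws =>
    simp only [to_matrix, PySem.List.pyGetD_zero, List.getD_cons_zero, List.headD_cons]
    have h0 : (List.range (w :: ws).length).map (fun _ => (List.range w.length).map (fun _ => (0 : Int)))
        = List.replicate (w :: ws).length (List.replicate w.length 0) := by
      simp [List.map_const', List.eq_replicate_iff]
    rw [h0, pvPass1 (w :: ws) w.length (by simpa using h)]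
    have hM1len : ((w :: ws).map (fun r => (r.take w.length).map pvFB)).length = (w :: ws).length := by
      simp
    have hrow0 : (((w :: ws).map (fun r => (r.take w.length).map pvFB)).getD 0 []).length
        = w.length := by
      simp
    rw [hM1len, hrow0, pvPass2 (w :: ws) w.length ms (by simpa using h)]
  

-- B, inner loop over k
theorem pvBInner (ms : List Int) (r : List Bool) (cc : Nat) (hcr : cc ≤ r.length)
    (acc : List Int) (idx : Nat) :
    (List.range cc).foldl (fun st2 k => pvBodyB ms r st2 k) (acc, idx)
      = (acc ++ pvRowFill (r.take cc) (ms.drop idx), idx + (r.take cc).count false) := by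
  induction cc with
  | zero => simp [pvRowFill]
  | succ cc ih =>
    have hcc_r : cc < r.length := by omega
    rw [List.range_succ, List.foldl_append, ih (by omega)]
    have htake : r.take (cc + 1) = r.take cc ++ [r[cc]] := List.take_succ_eq_append_getElem hcc_r
    have hcnt : (r.take (cc + 1)).count false
        = (r.take cc).count false + (if r[cc] then 0 else 1) := by
      rw [htake, List.count_append]
      cases hb : r[cc] <;> simp
    have hr' : r.getD cc false = r[cc] := List.getD_eq_getElem r false hcc_r
    have hgd : (ms.drop idx).getD ((r.take cc).count false) 0
        = ms.getD (idx + (r.take cc).count false) 0 := by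
      rw [List.getD_eq_getElem?_getD, List.getD_eq_getElem?_getD, List.getElem?_drop]
    simp only [List.foldl_cons, List.foldl_nil, pvBodyB, PySem.List.pyGetD_natCast, hr',
      htake, pvRowFill_append, hcnt]
    cases hb : r[cc] <;> simp [hb, hgd] <;> omega
  

-- B, outer loop over the rows
theorem pvBOuter (ms : List Int) (ws : List (List Bool)) (c : Nat) (h : ∀ r ∈ ws, c ≤ r.length)
    (acc : List (List Int)) (idx : Nat) :
    ws.foldl
        (fun (st : List (List Int) × Nat) row =>
          let inner := (List.range c).foldl (fun st2 k => pvBodyB ms row st2 k) ([], st.2)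
          (st.1 ++ [inner.1], inner.2))
        (acc, idx)
      = (acc ++ pvFill ws c (ms.drop idx), idx + pvFreeCount ws c) := by
  induction ws generalizing acc idx with
  | nil => simp [pvFill, pvFreeCount]
  | cons r rs ih =>
    simp only [List.foldl_cons]
    rw [pvBInner ms r c (h r (by simp)) [] idx]
    simp only [List.nil_append]
    rw [ih (fun q hq => h q (by simp [hq])) (acc ++ [pvRowFill (r.take c) (ms.drop idx)])
        (idx + (r.take c).count false)]
    simp [pvFill, pvFreeCount, List.drop_drop, Nat.add_comm, Nat.add_assoc]


-- B equals the reference function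
theorem pvB_eq (ms : List Int) (walls : List (List Bool))
    (h : ∀ r ∈ walls, (walls.headD []).length ≤ r.length) :
    to_matrix_alt ms walls = pvFill walls (walls.headD []).length ms := by
  cases walls with
  | nil => simp [to_matrix_alt, pvFill]
  | cons w ws =>
    simp only [to_matrix_alt, if_neg (by simp : ¬(w :: ws = [])), PySem.List.pyGetD_zero,
      List.getD_cons_zero, List.headD_cons]
    rw [pvBOuter ms (w :: ws) w.length (by simpa using h) [] 0]
    simp
  

-- ===== VERDICT (by name: the statement is the Claim_ definition above) =====
theorem to_matrix_spec : Claim_equal_to_matrix := by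
  intro ms walls _ hpre
  unfold Spec_to_matrix
  rw [pvA_eq ms walls hpre.1, pvB_eq ms walls hpre.1]
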